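-- pv_equiv track=rewrite | github.com/vitruvyan/vitruvyan-core | vitruvyan_core/core/orchestration/langgraph/node/proactive_suggestions_node.py | format_suggestions_for_response
-- ===== SOURCE A (Python) =====
-- from typing import Dict, Any, List
--
-- def format_suggestions_for_response(suggestions: List[Dict[str, str]]) -> str:
--     """
--     Format proactive suggestions into user-friendly text.
--     Used by compose_node to append suggestions to final response.
--     """
--     if not suggestions:
--         return ""
--
--     # Sort by priority (high first)
--     priority_order = {"high": 0, "medium": 1, "low": 2}
--     sorted_suggestions = sorted(suggestions, key=lambda s: priority_order.get(s.get("priority", "low"), 2))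
--
--     lines = ["\n\n━━━━━━━━━━━━━━━━━━━━━━━━━━━━━━━━━━"]
--     lines.append("📊 SUGGERIMENTI PROATTIVI")
--     lines.append("━━━━━━━━━━━━━━━━━━━━━━━━━━━━━━━━━━\n")
--
--     for suggestion in sorted_suggestions:
--         title = suggestion.get("title", "")
--         message = suggestion.get("message", "")
--         lines.append(f"{title}")
--         lines.append(f"{message}\n")
--
--     return "\n".join(lines)
-- ===== SOURCE B (Python) =====
-- def format_suggestions_for_response(suggestions):
--     """Same output as A, but buckets instead of a sort: one pass distributes
--     suggestions into high/medium/low lists, then the text is built over their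
--     concatenation (stable order preserved by appending in encounter order)."""
--     if not suggestions:
--         return ""
--     priority_order = {"high": 0, "medium": 1, "low": 2}
--     buckets = ([], [], [])
--     for s in suggestions:
--         buckets[priority_order.get(s.get("priority", "low"), 2)].append(s)
--     parts = ["\n\n━━━━━━━━━━━━━━━━━━━━━━━━━━━━━━━━━━",
--              "📊 SUGGERIMENTI PROATTIVI",
--              "━━━━━━━━━━━━━━━━━━━━━━━━━━━━━━━━━━\n"]
--     for s in buckets[0] + buckets[1] + buckets[2]:
--         parts.append(s.get("title", ""))
--         parts.append(s.get("message", "") + "\n")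
--     return "\n".join(parts)
-- ===== Notes on version B (the rewrite author's own statement) =====
-- stated objective: alternative
-- what changed: Replaced the stable sort by priority key with a single-pass three-bucket (high/medium/low) distribution whose concatenation reproduces the stable priority order.
import Mathlib
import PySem

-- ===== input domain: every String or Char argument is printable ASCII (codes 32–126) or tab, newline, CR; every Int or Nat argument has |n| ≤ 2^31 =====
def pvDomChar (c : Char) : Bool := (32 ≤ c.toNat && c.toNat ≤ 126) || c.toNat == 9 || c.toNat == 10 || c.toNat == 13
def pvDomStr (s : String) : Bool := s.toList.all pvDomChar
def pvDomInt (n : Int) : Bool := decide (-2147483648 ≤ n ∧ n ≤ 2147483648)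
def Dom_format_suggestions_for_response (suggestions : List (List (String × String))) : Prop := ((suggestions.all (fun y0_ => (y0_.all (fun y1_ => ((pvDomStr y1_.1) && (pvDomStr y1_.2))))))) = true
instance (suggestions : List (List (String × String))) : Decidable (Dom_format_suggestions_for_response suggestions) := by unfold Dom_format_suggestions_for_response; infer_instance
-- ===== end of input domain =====

-- B replaces the stable sort by a one-pass three-bucket distribution; same output.

-- ===== PORT A =====
-- s.get(k, dflt) on a Python dict (ports of both versions use this lookup)
def sget (s : List (String × String)) (k dflt : String) : String :=
  PySem.Dict.getD (PySem.Dict.ofList s) k dflt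

-- priority_order.get(s.get("priority", "low"), 2)  (the sort key / bucket index)
def prioKey (s : List (String × String)) : Int :=
  PySem.Dict.getD (PySem.Dict.ofList [("high", (0 : Int)), ("medium", 1), ("low", 2)])
    (sget s "priority" "low") 2

def format_suggestions_for_response (suggestions : List (List (String × String))) : String :=
  if suggestions = [] then ""
  else
    let sorted_suggestions := PySem.List.sorted suggestions (fun s => prioKey s) false
    let lines : List String :=
      ["\n\n━━━━━━━━━━━━━━━━━━━━━━━━━━━━━━━━━━",
       "📊 SUGGERIMENTI PROATTIVI",
       "━━━━━━━━━━━━━━━━━━━━━━━━━━━━━━━━━━\n"]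
    let lines := sorted_suggestions.foldl
      (fun acc s => acc ++ [sget s "title" "", sget s "message" "" ++ "\n"]) lines
    PySem.Str.join "\n" lines

-- ===== PORT B =====
-- one fold distributing each suggestion into the (high, medium, low) buckets
def pvBucketStep (b : List (List (String × String)) × List (List (String × String)) × List (List (String × String)))
    (s : List (String × String)) :
    List (List (String × String)) × List (List (String × String)) × List (List (String × String)) :=
  let k := prioKey s
  if k = 0 then (b.1 ++ [s], b.2.1, b.2.2)
  else if k = 1 then (b.1, b.2.1 ++ [s], b.2.2)
  else (b.1, b.2.1, b.2.2 ++ [s])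

def format_suggestions_for_response_alt (suggestions : List (List (String × String))) : String :=
  if suggestions = [] then ""
  else
    let buckets := suggestions.foldl pvBucketStep ([], [], [])
    let ordered := buckets.1 ++ (buckets.2.1 ++ buckets.2.2)
    let parts : List String :=
      ["\n\n━━━━━━━━━━━━━━━━━━━━━━━━━━━━━━━━━━",
       "📊 SUGGERIMENTI PROATTIVI",
       "━━━━━━━━━━━━━━━━━━━━━━━━━━━━━━━━━━\n"]
    let parts := ordered.foldl
      (fun acc s => acc ++ [sget s "title" "", sget s "message" "" ++ "\n"]) parts
    PySem.Str.join "\n" parts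

-- ===== PRECONDITION & SPEC =====
def Spec_format_suggestions_for_response (suggestions : List (List (String × String))) (out : String) : Prop := out = format_suggestions_for_response_alt suggestions
instance (suggestions : List (List (String × String))) (out : String) : Decidable (Spec_format_suggestions_for_response suggestions out) := by unfold Spec_format_suggestions_for_response; infer_instance

-- ===== CLAIM (what is proved, stated in full; the proofs are below) =====
def Claim_equal_format_suggestions_for_response : Prop := ∀ (suggestions : List (List (String × String))), Dom_format_suggestions_for_response suggestions → Spec_format_suggestions_for_response suggestions (format_suggestions_for_response suggestions)

-- ===== LEMMAS AND PROOFS =====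

theorem prioKey_cases (s : List (String × String)) :
    prioKey s = 0 ∨ prioKey s = 1 ∨ prioKey s = 2 := by
  unfold prioKey
  cases h1 : ("high" == sget s "priority" "low") <;>
    cases h2 : ("medium" == sget s "priority" "low") <;>
      cases h3 : ("low" == sget s "priority" "low") <;>
        simp [PySem.Dict.getD, PySem.Dict.ofList, PySem.Dict.update, PySem.Dict.insert,
              PySem.Dict.empty, PySem.Dict.get?, PySem.Dict.contains, List.find?, h1, h2, h3]

theorem insertBy_append_skip {α : Type} (before : α → α → Bool) (x : α) (ys zs : List α)
    (h : ∀ y ∈ ys, before x y = false) :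
    PySem.List.insertBy before x (ys ++ zs) = ys ++ PySem.List.insertBy before x zs := by
  induction ys with
  | nil => simp
  | cons y t ih =>
      have hy : before x y = false := h y (by simp)
      simp [PySem.List.insertBy, hy, ih (fun z hz => h z (by simp [hz]))]

theorem insertBy_prepend {α : Type} (before : α → α → Bool) (x : α) (zs : List α)
    (h : ∀ y ∈ zs, before x y = true) :
    PySem.List.insertBy before x zs = x :: zs := by
  cases zs with
  | nil => rfl
  | cons y t => simp [PySem.List.insertBy, h y (by simp)]

-- the loop invariant: insertion sort over a {0,1,2}-valued key is bucket concatenation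
theorem foldl_insertBy_buckets (xs : List (List (String × String)))
    (h m l : List (List (String × String)))
    (hh : ∀ y ∈ h, prioKey y = 0) (hm : ∀ y ∈ m, prioKey y = 1) (hl : ∀ y ∈ l, prioKey y = 2) :
    xs.foldl (fun acc x => PySem.List.insertBy (fun a b => decide (prioKey a < prioKey b)) x acc)
        (h ++ (m ++ l))
      = (fun b => b.1 ++ (b.2.1 ++ b.2.2)) (xs.foldl pvBucketStep (h, m, l)) := by
  induction xs generalizing h m l with
  | nil => simp
  | cons x t ih =>
      rcases prioKey_cases x with hk | hk | hk
      · have step : PySem.List.insertBy (fun a b => decide (prioKey a < prioKey b)) x (h ++ (m ++ l))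
            = (h ++ [x]) ++ (m ++ l) := by
          rw [insertBy_append_skip _ _ _ _ (fun y hy => by simp [hh y hy, hk]),
              insertBy_prepend _ _ _ (fun y hy => by
                rcases List.mem_append.mp hy with hy' | hy'
                · simp [hm y hy', hk]
                · simp [hl y hy', hk])]
          simp
        simp only [List.foldl_cons, step, pvBucketStep, hk]
        have := ih (h ++ [x]) m l
          (fun y hy => by rcases List.mem_append.mp hy with hy' | hy' <;> simp_all) hm hl
        simpa [List.append_assoc] using this
      · have step : PySem.List.insertBy (fun a b => decide (prioKey a < prioKey b)) x (h ++ (m ++ l))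
            = h ++ ((m ++ [x]) ++ l) := by
          rw [insertBy_append_skip _ _ _ _ (fun y hy => by simp [hh y hy, hk]),
              insertBy_append_skip _ _ _ _ (fun y hy => by simp [hm y hy, hk]),
              insertBy_prepend _ _ _ (fun y hy => by simp [hl y hy, hk])]
          simp
        simp only [List.foldl_cons, step, pvBucketStep, hk]
        have := ih h (m ++ [x]) l hh
          (fun y hy => by rcases List.mem_append.mp hy with hy' | hy' <;> simp_all) hl
        simpa [List.append_assoc] using this
      · have step : PySem.List.insertBy (fun a b => decide (prioKey a < prioKey b)) x (h ++ (m ++ l))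
            = h ++ (m ++ (l ++ [x])) := by
          rw [PySem.List.insertBy_of_forall_not_before _ _ _ (fun y hy => by
            rcases List.mem_append.mp hy with hy' | hy'
            · simp [hh y hy', hk]
            · rcases List.mem_append.mp hy' with hy'' | hy''
              · simp [hm y hy'', hk]
              · simp [hl y hy'', hk])]
          simp
        simp only [List.foldl_cons, step, pvBucketStep, hk]
        have := ih h m (l ++ [x]) hh hm
          (fun y hy => by rcases List.mem_append.mp hy with hy' | hy' <;> simp_all)
        simpa [List.append_assoc] using this

theorem sorted_eq_buckets (xs : List (List (String × String))) :
    PySem.List.sorted xs (fun s => prioKey s) false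
      = (fun b => b.1 ++ (b.2.1 ++ b.2.2)) (xs.foldl pvBucketStep ([], [], [])) := by
  rw [PySem.List.sorted_eq_foldl_insertBy]
  simpa using foldl_insertBy_buckets xs [] [] [] (by simp) (by simp) (by simp)

-- ===== VERDICT (by name: the statement is the Claim_ definition above) =====
theorem format_suggestions_for_response_spec : Claim_equal_format_suggestions_for_response := by
  intro suggestions _
  unfold Spec_format_suggestions_for_response
  unfold format_suggestions_for_response format_suggestions_for_response_alt
  by_cases hnil : suggestions = []
  · simp [hnil]
  · simp only [hnil]
    rw [sorted_eq_buckets]
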